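-- pv_equiv track=rewrite | github.com/nishanttG/FDV-Tasks | TactIQ/src/agents/intent_classifier.py | _count_capitalized_names
-- ===== SOURCE A (Python) =====
-- def _count_capitalized_names(query: str) -> int:
--     """Count potential player names (capitalized words)"""
--     # Simple heuristic: count sequences of 2+ capitalized words
--     words = query.split()
--     cap_sequences = 0
--     in_sequence = False
--
--     for word in words:
--         # Check if word starts with capital and has lowercase letters
--         if word and word[0].isupper() and len(word) > 1 and any(c.islower() for c in word):
--             if not in_sequence:
--                 cap_sequences += 1
--                 in_sequence = True
--         else:
--             in_sequence = False
--
--     return cap_sequences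
-- ===== SOURCE B (Python) =====
-- def _is_cap(word: str) -> bool:
--     return bool(word) and word[0].isupper() and len(word) > 1 and any(c.islower() for c in word)
--
--
-- def _count_capitalized_names(query: str) -> int:
--     """Count potential player names (capitalized words)"""
--     # number of runs of True = (# True) - (# adjacent True,True pairs)
--     caps = [_is_cap(w) for w in query.split()]
--     return sum(caps) - sum(a and b for a, b in zip(caps, caps[1:]))
-- ===== Notes on version B (the rewrite author's own statement) =====
-- stated objective: alternative
-- what changed: Replaced the sequential in_sequence flag run-detection with an arithmetic identity: count of True runs = number of capitalized words minus number of adjacent capitalized pairs, computed as two independent sums.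
import Mathlib
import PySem

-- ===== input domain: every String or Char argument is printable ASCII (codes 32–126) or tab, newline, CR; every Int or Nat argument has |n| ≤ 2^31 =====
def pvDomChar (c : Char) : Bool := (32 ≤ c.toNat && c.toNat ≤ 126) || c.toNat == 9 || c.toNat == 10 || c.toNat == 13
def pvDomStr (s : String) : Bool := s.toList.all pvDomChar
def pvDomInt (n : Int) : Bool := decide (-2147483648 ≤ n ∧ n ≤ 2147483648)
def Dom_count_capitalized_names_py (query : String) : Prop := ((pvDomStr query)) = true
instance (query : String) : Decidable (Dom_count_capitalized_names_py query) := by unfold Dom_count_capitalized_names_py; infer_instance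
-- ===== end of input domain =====

-- B replaces the flag-based run detection of A with the identity runs = #True − #adjacent True pairs; no speed claim.

-- ===== PORT A =====
-- 'word and word[0].isupper() and len(word) > 1 and any(c.islower() for c in word)'
def pvCapA (w : String) : Bool :=
  !w.toList.isEmpty &&
    (match w.toList with
     | [] => false
     | c :: _ => PySem.Chars.isupper c) &&
    decide (1 < w.toList.length) &&
    w.toList.any PySem.Chars.islower

def pvStepA (st : Int × Bool) (word : String) : Int × Bool :=
  if pvCapA word then
    if !st.2 then (st.1 + 1, true) else st
  else (st.1, false)

def count_capitalized_names_py (query : String) : Int :=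
  let words := PySem.Str.split₀ query
  let res := words.foldl pvStepA (0, false)
  res.1

-- ===== PORT B =====
-- same predicate, written as B's helper _is_cap
def pvCapB (w : String) : Bool :=
  !w.toList.isEmpty &&
    (match w.toList with
     | [] => false
     | c :: _ => PySem.Chars.isupper c) &&
    decide (1 < w.toList.length) &&
    w.toList.any PySem.Chars.islower

def count_capitalized_names_py_alt (query : String) : Int :=
  let caps := (PySem.Str.split₀ query).map pvCapB
  let total := caps.foldl (fun s b => s + (if b then (1 : Int) else 0)) 0
  let pairs := (caps.zip caps.tail).foldl
      (fun s p => s + (if p.1 && p.2 then (1 : Int) else 0)) 0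
  total - pairs

-- ===== PRECONDITION & SPEC =====
def Spec_count_capitalized_names_py (query : String) (out : Int) : Prop := out = count_capitalized_names_py_alt query
instance (query : String) (out : Int) : Decidable (Spec_count_capitalized_names_py query out) := by unfold Spec_count_capitalized_names_py; infer_instance

-- ===== CLAIM (what is proved, stated in full; the proofs are below) =====
def Claim_equal_count_capitalized_names_py : Prop := ∀ (query : String), Dom_count_capitalized_names_py query → Spec_count_capitalized_names_py query (count_capitalized_names_py query)

-- ===== LEMMAS AND PROOFS =====

-- number of True entries
def pvCountT : List Bool → Int
  | [] => 0
  | b :: rest => (if b then 1 else 0) + pvCountT rest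

-- number of adjacent True,True pairs in prev :: l
def pvAdj (prev : Bool) : List Bool → Int
  | [] => 0
  | b :: rest => (if prev && b then 1 else 0) + pvAdj b rest

theorem pvCountT_fold (l : List Bool) (c : Int) :
    l.foldl (fun s b => s + (if b then (1 : Int) else 0)) c = c + pvCountT l := by
  induction l generalizing c with
  | nil => simp [pvCountT]
  | cons b rest ih => simp [pvCountT, ih]; ring

theorem pvAdj_fold (l : List Bool) (prev : Bool) (c : Int) :
    ((prev :: l).zip l).foldl (fun s p => s + (if p.1 && p.2 then (1 : Int) else 0)) c
      = c + pvAdj prev l := by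
  induction l generalizing prev c with
  | nil => simp [pvAdj]
  | cons b rest ih =>
    simp only [List.zip_cons_cons, List.foldl_cons]
    rw [ih]
    simp [pvAdj]
    ring

-- A's flag recursion
def pvRuns (inSeq : Bool) : List Bool → Int
  | [] => 0
  | b :: rest => (if b then (if inSeq then 0 else 1) else 0) + pvRuns b rest

theorem foldA_eq (ws : List String) (c : Int) (inSeq : Bool) :
    (ws.foldl pvStepA (c, inSeq)).1 = c + pvRuns inSeq (ws.map pvCapA) := by
  induction ws generalizing c inSeq with
  | nil => simp [pvRuns]
  | cons w rest ih =>
    cases h : pvCapA w <;> cases inSeq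
    · have e : pvStepA (c, false) w = (c, false) := by simp [pvStepA, h]
      rw [List.foldl_cons, e, ih]; simp [pvRuns, h]
    · have e : pvStepA (c, true) w = (c, false) := by simp [pvStepA, h]
      rw [List.foldl_cons, e, ih]; simp [pvRuns, h]
    · have e : pvStepA (c, false) w = (c + 1, true) := by simp [pvStepA, h]
      rw [List.foldl_cons, e, ih]; simp [pvRuns, h]; ring
    · have e : pvStepA (c, true) w = (c, true) := by simp [pvStepA, h]
      rw [List.foldl_cons, e, ih]; simp [pvRuns, h]

theorem pvRuns_eq (l : List Bool) (prev : Bool) :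
    pvRuns prev l = pvCountT l - pvAdj prev l := by
  induction l generalizing prev with
  | nil => simp [pvRuns, pvCountT, pvAdj]
  | cons b rest ih =>
    cases b <;> cases prev <;> simp [pvRuns, pvCountT, pvAdj, ih] <;> ring

-- ===== VERDICT (by name: the statement is the Claim_ definition above) =====
theorem count_capitalized_names_py_spec : Claim_equal_count_capitalized_names_py := by
  intro query _
  unfold Spec_count_capitalized_names_py count_capitalized_names_py count_capitalized_names_py_alt
  have hB : pvCapB = pvCapA := rfl
  rw [hB, foldA_eq, pvRuns_eq]
  show _ = ((PySem.Str.split₀ query).map pvCapA).foldl (fun s b => s + (if b then (1 : Int) else 0)) 0 -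
      ((((PySem.Str.split₀ query).map pvCapA).zip ((PySem.Str.split₀ query).map pvCapA).tail).foldl
        (fun s p => s + (if p.1 && p.2 then (1 : Int) else 0)) 0)
  cases h : (PySem.Str.split₀ query).map pvCapA with
  | nil => simp [pvCountT, pvAdj]
  | cons b rest =>
    rw [pvCountT_fold]
    have hz : (b :: rest).zip (b :: rest).tail = ((b :: rest).zip rest) := rfl
    rw [hz, pvAdj_fold rest b 0]
    simp [pvAdj, pvCountT]
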